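-- pv_equiv track=rewrite | github.com/mdaxf/iac-air | backend/app/middleware/rate_limit_middleware.py | _is_ai_endpoint
-- ===== SOURCE A (Python) =====
-- class RateLimitConfig:
--     """Rate limiting configuration"""
--
--     # General API limits (per minute)
--     GENERAL_REQUESTS_PER_MINUTE = 100
--     GENERAL_REQUESTS_PER_HOUR = 1000
--
--     # AI API specific limits (per minute)
--     AI_REQUESTS_PER_MINUTE = 10
--     AI_REQUESTS_PER_HOUR = 100
--     AI_REQUESTS_PER_DAY = 500
--
--     # Cost control limits (in USD)
--     DAILY_COST_LIMIT = 50.0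
--     HOURLY_COST_LIMIT = 10.0
--
--     # Token usage limits
--     DAILY_TOKEN_LIMIT = 100000
--     HOURLY_TOKEN_LIMIT = 20000
--
--     # AI endpoints that should be rate limited
--     AI_ENDPOINTS = [
--         "/api/v1/text2sql/generate",
--         "/api/v1/chat/message",
--         "/api/v1/vector/search",
--         "/api/v1/admin/databases/*/generate-vectors"
--     ]
--
-- def _is_ai_endpoint(path: str) -> bool:
--     """Check if endpoint is an AI endpoint"""
--     for ai_path in RateLimitConfig.AI_ENDPOINTS:
--         if ai_path.endswith("*"):
--             if path.startswith(ai_path[:-1]):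
--                 return True
--         elif path == ai_path:
--             return True
--     return False
-- ===== SOURCE B (Python) =====
-- class RateLimitConfig:
--     AI_ENDPOINTS = [
--         "/api/v1/text2sql/generate",
--         "/api/v1/chat/message",
--         "/api/v1/vector/search",
--         "/api/v1/admin/databases/*/generate-vectors"
--     ]
--
-- def _glob_match(pattern: str, path: str) -> bool:
--     """Match path against pattern, where '*' (anywhere) matches any substring."""
--     star = pattern.find("*")
--     if star == -1:
--         return path == pattern
--     pre = pattern[:star]
--     suf = pattern[star + 1:]
--     return len(path) >= len(pre) + len(suf) and path.startswith(pre) and path.endswith(suf)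
--
-- def _is_ai_endpoint(path: str) -> bool:
--     """Check if endpoint is an AI endpoint"""
--     return any(_glob_match(p, path) for p in RateLimitConfig.AI_ENDPOINTS)
-- ===== Notes on version B (the rewrite author's own statement) =====
-- stated objective: alternative
-- what changed: B replaces A's endswith('*')-then-prefix/exact branch-in-loop with a generic glob matcher that splits each pattern at the first '*' and tests prefix + suffix + length, so a '*' anywhere in a pattern works; A's wildcard branch only fires for a TRAILING '*' and is dead code for the config's actual wildcard pattern.
-- intended difference: On paths that start with '/api/v1/admin/databases/' and end with '/generate-vectors' with length >= 41 but are not the literal pattern string, A returns False (its endswith('*') check never fires because the '*' is mid-pattern) while B returns True, which is the intended behaviour: the config lists that endpoint as a wildcard to be rate limited. — e.g. on _is_ai_endpoint("/api/v1/admin/databases/7/generate-vectors"): A returns false, B returns true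
import Mathlib
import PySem

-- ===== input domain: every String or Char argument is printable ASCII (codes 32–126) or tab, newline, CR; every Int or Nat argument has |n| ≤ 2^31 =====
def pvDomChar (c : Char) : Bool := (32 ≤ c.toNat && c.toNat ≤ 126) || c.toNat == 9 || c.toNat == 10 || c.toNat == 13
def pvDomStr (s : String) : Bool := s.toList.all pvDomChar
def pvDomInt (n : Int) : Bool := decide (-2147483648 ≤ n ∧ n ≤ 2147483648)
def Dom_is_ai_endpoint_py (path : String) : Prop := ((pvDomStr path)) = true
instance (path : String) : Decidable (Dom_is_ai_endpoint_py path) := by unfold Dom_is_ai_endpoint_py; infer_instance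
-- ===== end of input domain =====

-- B is a generic glob matcher (split each pattern at its first '*', test prefix+suffix+length)
-- instead of A's endswith('*')-gated loop; A's wildcard branch is dead code for the config's
-- mid-pattern '*', so on such wildcard paths A returns False, B the intended True (see D_ below).

-- ===== PORT A =====
def pvAiEndpoints : List String :=
  [ "/api/v1/text2sql/generate"
  , "/api/v1/chat/message"
  , "/api/v1/vector/search"
  , "/api/v1/admin/databases/*/generate-vectors" ]

-- the 'for ai_path in AI_ENDPOINTS' loop of A, branch for branch
def pvLoopA (path : String) : List String → Bool
  | [] => false
  | ai_path :: rest =>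
      if PySem.Str.endswith ai_path "*" then
        if PySem.Str.startswith path (PySem.Str.slice ai_path none (some (-1))) then true
        else pvLoopA path rest
      else if path == ai_path then true
      else pvLoopA path rest

def is_ai_endpoint_py (path : String) : Bool := pvLoopA path pvAiEndpoints

-- ===== PORT B =====
-- _glob_match of Source B: '*' anywhere in the pattern matches any substring
def pvGlobMatch (pattern path : String) : Bool :=
  let star := PySem.Str.find pattern "*"
  if star == -1 then path == pattern
  else
    let pre := PySem.Str.slice pattern none (some star)
    let suf := PySem.Str.slice pattern (some (star + 1)) none
    decide (PySem.Str.len pre + PySem.Str.len suf ≤ PySem.Str.len path)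
      && PySem.Str.startswith path pre && PySem.Str.endswith path suf

def is_ai_endpoint_py_alt (path : String) : Bool :=
  pvAiEndpoints.any (fun p => pvGlobMatch p path)

-- ===== PRECONDITION & SPEC =====
-- On paths starting with "/api/v1/admin/databases/", ending with "/generate-vectors", of length
-- ≥ 41 and not equal to the literal pattern, A returns false (its endswith("*") test never fires,
-- the '*' being mid-pattern) while B returns true — the intended value: the config lists that
-- endpoint with a wildcard precisely so such paths are rate limited.
def D_is_ai_endpoint_py (path : String) : Prop :=
  (PySem.Str.startswith path "/api/v1/admin/databases/"
    && PySem.Str.endswith path "/generate-vectors"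
    && decide (41 ≤ PySem.Str.len path)
    && !(path == "/api/v1/admin/databases/*/generate-vectors")) = true
instance (path : String) : Decidable (D_is_ai_endpoint_py path) := by unfold D_is_ai_endpoint_py; infer_instance

def Spec_is_ai_endpoint_py (path : String) (out : Bool) : Prop :=
  ¬ D_is_ai_endpoint_py path → out = is_ai_endpoint_py_alt path
instance (path : String) (out : Bool) : Decidable (Spec_is_ai_endpoint_py path out) := by unfold Spec_is_ai_endpoint_py; infer_instance

def pvDiffWitness_is_ai_endpoint_py : String := "/api/v1/admin/databases/7/generate-vectors"
def pvDiffWitnessOut_is_ai_endpoint_py : Bool × Bool := (false, true)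

-- ===== CLAIM (what is proved, stated in full; the proofs are below) =====
def Claim_unchanged_is_ai_endpoint_py : Prop := ∀ (path : String), Dom_is_ai_endpoint_py path → Spec_is_ai_endpoint_py path (is_ai_endpoint_py path)
def Claim_changed_is_ai_endpoint_py : Prop := Dom_is_ai_endpoint_py (pvDiffWitness_is_ai_endpoint_py) ∧ D_is_ai_endpoint_py (pvDiffWitness_is_ai_endpoint_py) ∧ is_ai_endpoint_py (pvDiffWitness_is_ai_endpoint_py) = pvDiffWitnessOut_is_ai_endpoint_py.1 ∧ is_ai_endpoint_py_alt (pvDiffWitness_is_ai_endpoint_py) = pvDiffWitnessOut_is_ai_endpoint_py.2 ∧ pvDiffWitnessOut_is_ai_endpoint_py.1 ≠ pvDiffWitnessOut_is_ai_endpoint_py.2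
def Claim_exact_is_ai_endpoint_py : Prop := ∀ (path : String), Dom_is_ai_endpoint_py path → D_is_ai_endpoint_py path → is_ai_endpoint_py path ≠ is_ai_endpoint_py_alt path

-- ===== LEMMAS AND PROOFS =====
theorem pvGlob1 (path : String) :
    pvGlobMatch "/api/v1/text2sql/generate" path = (path == "/api/v1/text2sql/generate") := by
  have hf : PySem.Str.find "/api/v1/text2sql/generate" "*" = -1 := by decide
  simp only [pvGlobMatch]; rw [hf]; simp
theorem pvGlob2 (path : String) :
    pvGlobMatch "/api/v1/chat/message" path = (path == "/api/v1/chat/message") := by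
  have hf : PySem.Str.find "/api/v1/chat/message" "*" = -1 := by decide
  simp only [pvGlobMatch]; rw [hf]; simp
theorem pvGlob3 (path : String) :
    pvGlobMatch "/api/v1/vector/search" path = (path == "/api/v1/vector/search") := by
  have hf : PySem.Str.find "/api/v1/vector/search" "*" = -1 := by decide
  simp only [pvGlobMatch]; rw [hf]; simp
theorem pvGlob4 (path : String) :
    pvGlobMatch "/api/v1/admin/databases/*/generate-vectors" path =
      (decide (41 ≤ PySem.Str.len path)
        && PySem.Str.startswith path "/api/v1/admin/databases/"
        && PySem.Str.endswith path "/generate-vectors") := by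
  have hf : PySem.Str.find "/api/v1/admin/databases/*/generate-vectors" "*" = 24 := by decide
  have hpre : PySem.Str.slice "/api/v1/admin/databases/*/generate-vectors" none (some 24)
      = "/api/v1/admin/databases/" := by decide
  have hsuf : PySem.Str.slice "/api/v1/admin/databases/*/generate-vectors" (some (24 + 1)) none
      = "/generate-vectors" := by decide
  have hl1 : PySem.Str.len "/api/v1/admin/databases/" = 24 := by decide
  have hl2 : PySem.Str.len "/generate-vectors" = 17 := by decide
  simp only [pvGlobMatch]
  rw [hf, hpre, hsuf, hl1, hl2]
  norm_num

theorem pvA_eq (path : String) :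
    is_ai_endpoint_py path =
      (path == "/api/v1/text2sql/generate" || path == "/api/v1/chat/message"
        || path == "/api/v1/vector/search"
        || path == "/api/v1/admin/databases/*/generate-vectors") := by
  unfold is_ai_endpoint_py pvAiEndpoints
  simp only [pvLoopA]
  have e1 : PySem.Str.endswith "/api/v1/text2sql/generate" "*" = false := by decide
  have e2 : PySem.Str.endswith "/api/v1/chat/message" "*" = false := by decide
  have e3 : PySem.Str.endswith "/api/v1/vector/search" "*" = false := by decide
  have e4 : PySem.Str.endswith "/api/v1/admin/databases/*/generate-vectors" "*" = false := by decide
  rw [e1, e2, e3, e4]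
  cases h1 : path == "/api/v1/text2sql/generate" <;>
  cases h2 : path == "/api/v1/chat/message" <;>
  cases h3 : path == "/api/v1/vector/search" <;>
  cases h4 : path == "/api/v1/admin/databases/*/generate-vectors" <;>
  simp_all

theorem pvB_eq (path : String) :
    is_ai_endpoint_py_alt path =
      (path == "/api/v1/text2sql/generate" || path == "/api/v1/chat/message"
        || path == "/api/v1/vector/search"
        || (decide (41 ≤ PySem.Str.len path)
            && PySem.Str.startswith path "/api/v1/admin/databases/"
            && PySem.Str.endswith path "/generate-vectors")) := by
  unfold is_ai_endpoint_py_alt pvAiEndpoints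
  simp only [List.any_cons, List.any_nil, pvGlob1, pvGlob2, pvGlob3, pvGlob4, Bool.or_false,
    Bool.or_assoc]

-- ===== VERDICT (by name: the statement is the Claim_ definitions above) =====
theorem is_ai_endpoint_py_spec : Claim_unchanged_is_ai_endpoint_py := by
  intro path _ hnD
  show is_ai_endpoint_py path = is_ai_endpoint_py_alt path
  rw [pvA_eq, pvB_eq]
  unfold D_is_ai_endpoint_py at hnD
  by_cases h4 : path = "/api/v1/admin/databases/*/generate-vectors"
  · subst h4; decide
  · have h4' : (path == "/api/v1/admin/databases/*/generate-vectors") = false := by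
      simp [h4]
    rw [h4']
    have hG : (decide (41 ≤ PySem.Str.len path)
        && PySem.Str.startswith path "/api/v1/admin/databases/"
        && PySem.Str.endswith path "/generate-vectors") = false := by
      cases hs : PySem.Str.startswith path "/api/v1/admin/databases/" <;>
      cases he : PySem.Str.endswith path "/generate-vectors" <;>
      cases hl : decide (41 ≤ PySem.Str.len path) <;>
      simp only [hs, he, hl, h4', Bool.and_true, Bool.and_false,
        Bool.not_false] at hnD ⊢; first | rfl | exact absurd hnD (by simp)
    rw [hG]

theorem is_ai_endpoint_py_changed : Claim_changed_is_ai_endpoint_py := by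
  unfold Claim_changed_is_ai_endpoint_py; decide

theorem is_ai_endpoint_py_tight : Claim_exact_is_ai_endpoint_py := by
  intro path _ hD
  unfold D_is_ai_endpoint_py at hD
  rw [pvA_eq, pvB_eq]
  simp only [Bool.and_eq_true, Bool.not_eq_eq_eq_not, Bool.not_true] at hD
  obtain ⟨⟨⟨hs, he⟩, hl⟩, h4⟩ := hD
  have h1 : (path == "/api/v1/text2sql/generate") = false := by
    cases h : path == "/api/v1/text2sql/generate"
    · rfl
    · exfalso; have := eq_of_beq h; subst this; exact absurd hs (by decide)
  have h2 : (path == "/api/v1/chat/message") = false := by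
    cases h : path == "/api/v1/chat/message"
    · rfl
    · exfalso; have := eq_of_beq h; subst this; exact absurd hs (by decide)
  have h3 : (path == "/api/v1/vector/search") = false := by
    cases h : path == "/api/v1/vector/search"
    · rfl
    · exfalso; have := eq_of_beq h; subst this; exact absurd hs (by decide)
  simp only [h1, h2, h3, h4, hs, he, hl, Bool.or_false, Bool.false_or, Bool.and_true]
  decide
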